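-- pv_equiv track=rewrite | github.com/bravmi/aoc2023 | aoc2023/day3/part1.py | find_number_regions
-- ===== SOURCE A (Python) =====
-- import collections
--
-- def find_number_regions(
--     board: dict[tuple[int, int], str]
-- ) -> dict[tuple[int, int], int]:
--     regions: dict[tuple[int, int], int] = collections.defaultdict(int)
--     current = None
--     for (i, j), c in sorted(board.items()):
--         if not c.isdigit():
--             current = None
--             continue
--         if current is None or i != current[0]:
--             current = i, j
--         regions[current] += 1
--     return regions
-- ===== SOURCE B (Python) =====
-- import collections
--
-- def find_number_regions(
--     board: dict[tuple[int, int], str]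
-- ) -> dict[tuple[int, int], int]:
--     def start(i, j):
--         barrier = max((jj for (ii, jj), cc in board.items()
--                        if ii == i and jj < j and not cc.isdigit()), default=None)
--         return min(jj for (ii, jj), cc in board.items()
--                    if ii == i and jj <= j and cc.isdigit()
--                    and (barrier is None or barrier < jj))
--     starts = [(i, start(i, j)) for (i, j), c in board.items() if c.isdigit()]
--     regions: dict[tuple[int, int], int] = collections.defaultdict(int)
--     for k in sorted(set(starts)):
--         regions[k] = starts.count(k)
--     return regions
-- ===== Notes on version B (the rewrite author's own statement) =====
-- stated objective: alternative
-- what changed: A makes one stateful scan over the globally sorted cells, carrying a `current` run key that is reset on non-digit cells and row changes; B keeps no scan state at all: it computes each digit cell's region start independently by a closed-form min/max over the board (the nearest non-digit column to its left is the barrier, the start is the smallest digit column after that barrier), then counts the starts and emits them in sorted order.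
import Mathlib
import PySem

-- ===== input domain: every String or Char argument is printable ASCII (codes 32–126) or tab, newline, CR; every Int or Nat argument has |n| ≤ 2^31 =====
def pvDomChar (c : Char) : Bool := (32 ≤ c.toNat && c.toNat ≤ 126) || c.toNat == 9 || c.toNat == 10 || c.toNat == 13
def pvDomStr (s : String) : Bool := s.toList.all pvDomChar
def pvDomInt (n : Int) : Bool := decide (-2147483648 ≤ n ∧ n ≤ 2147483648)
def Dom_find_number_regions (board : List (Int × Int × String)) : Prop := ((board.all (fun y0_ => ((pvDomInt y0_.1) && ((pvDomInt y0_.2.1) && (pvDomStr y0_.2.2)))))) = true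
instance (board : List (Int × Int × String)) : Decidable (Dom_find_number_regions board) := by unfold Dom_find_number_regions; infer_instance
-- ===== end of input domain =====

-- B replaces A's stateful scan over the globally sorted cells with a scan-free computation:
-- each digit cell's region start is computed independently by a closed-form min/max over the
-- board (last non-digit column before it, then first digit column after that barrier), and the
-- result is a count of these starts (objective: alternative algorithm; not faster — A is
-- O(n log n), B is O(n^2)). Equivalence of the RETURN value is proved for all inputs.

-- ===== PORT A =====
-- loop body of A: state = (regions dict, current); one item ((i,j),c)
def pvAStep (s : PySem.Dict (Int × Int) Int × Option (Int × Int)) (e : (Int × Int) × String) :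
    PySem.Dict (Int × Int) Int × Option (Int × Int) :=
  if ¬ (PySem.Str.strIsdigit e.2) then (s.1, none)
  else
    let cur : Int × Int :=
      match s.2 with
      | none => e.1
      | some c0 => if e.1.1 ≠ c0.1 then e.1 else c0
    (s.1.modify cur 0 (· + 1), some cur)

def find_number_regions (board : List (Int × Int × String)) : List (Int × Int × Int) :=
  -- the parameter is a Python dict: build it (duplicate keys: last value, first position)
  let d : PySem.Dict (Int × Int) String :=
    PySem.Dict.ofList (board.map (fun p => ((p.1, p.2.1), p.2.2)))
  -- sorted(board.items()): keys (i,j) are distinct, so Python's tuple sort never reaches the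
  -- string component; sorting by the key pair (i, j) is exact
  let items := PySem.List.sorted2 d.items (fun e => e.1.1) (fun e => e.1.2)
  (items.foldl pvAStep (PySem.Dict.empty, none)).1.items.map (fun p => (p.1.1, p.1.2, p.2))

-- ===== PORT B =====
-- start(i, j) of Source B: barrier = max(non-digit columns < j in row i, default None);
-- result = min(digit columns jj ≤ j in row i with barrier < jj).  min(...) with no default
-- raises on an empty sequence; here it never does (the cell (i, j) itself qualifies), so the
-- Option is returned and the caller's .getD is dead code.
def pvStartB (items : List ((Int × Int) × String)) (i j : Int) : Option Int :=
  let barrier := PySem.List.max?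
    ((items.filter (fun x => x.1.1 == i && (decide (x.1.2 < j) && !PySem.Str.strIsdigit x.2))).map
      (fun x => x.1.2)) (fun y => y)
  PySem.List.min?
    ((items.filter (fun x => x.1.1 == i && (decide (x.1.2 ≤ j) && (PySem.Str.strIsdigit x.2 &&
        (match barrier with | none => true | some b => decide (b < x.1.2)))))).map
      (fun x => x.1.2)) (fun y => y)

def find_number_regions_alt (board : List (Int × Int × String)) : List (Int × Int × Int) :=
  let d : PySem.Dict (Int × Int) String :=
    PySem.Dict.ofList (board.map (fun p => ((p.1, p.2.1), p.2.2)))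
  let items := d.items
  -- starts = [(i, start(i, j)) for (i, j), c in board.items() if c.isdigit()]
  let starts : List (Int × Int) :=
    (items.filter (fun e => PySem.Str.strIsdigit e.2)).map
      (fun e => (e.1.1, (pvStartB items e.1.1 e.1.2).getD e.1.2))
  -- for k in sorted(set(starts)): regions[k] = starts.count(k)  (tuple sort = sort by (fst, snd))
  let regions := (PySem.List.sorted2 (PySem.Set.ofList starts) (fun k => k.1) (fun k => k.2)).foldl
      (fun d k => d.insert k ((starts.count k : Int))) PySem.Dict.empty
  regions.items.map (fun p => (p.1.1, p.1.2, p.2))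

-- ===== PRECONDITION & SPEC =====
def Spec_find_number_regions (board : List (Int × Int × String)) (out : List (Int × Int × Int)) : Prop := out = find_number_regions_alt board
instance (board : List (Int × Int × String)) (out : List (Int × Int × Int)) : Decidable (Spec_find_number_regions board out) := by unfold Spec_find_number_regions; infer_instance

-- ===== CLAIM (what is proved, stated in full; the proofs are below) =====
def Claim_equal_find_number_regions : Prop := ∀ (board : List (Int × Int × String)), Dom_find_number_regions board → Spec_find_number_regions board (find_number_regions board)

-- ===== LEMMAS AND PROOFS =====

-- the sorted row indices and the sorted contents of one row, as functions of the items list l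
def pvKs (l : List ((Int × Int) × String)) : List Int :=
  PySem.List.sorted (PySem.Set.ofList (l.map (fun e => e.1.1))) (fun x => x)

def pvSrow (l : List ((Int × Int) × String)) (i : Int) : List (Int × String) :=
  PySem.List.sorted ((l.filter (fun e => e.1.1 == i)).map (fun e => (e.1.2, e.2))) (fun q => q.1)

def pvLift (i : Int) (q : Int × String) : (Int × Int) × String := ((i, q.1), q.2)

-- the closed forms of B, re-read over one row's cell list (any order; values are order-free)
def pvBarL (row : List (Int × String)) (j : Int) : List Int :=
  (row.filter (fun q => decide (q.1 < j) && !PySem.Str.strIsdigit q.2)).map (fun q => q.1)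

def pvBar (row : List (Int × String)) (j : Int) : Option Int :=
  PySem.List.max? (pvBarL row j) (fun y => y)

def pvCandL (row : List (Int × String)) (j : Int) : List Int :=
  (row.filter (fun q => decide (q.1 ≤ j) && (PySem.Str.strIsdigit q.2 &&
      (match pvBar row j with | none => true | some b => decide (b < q.1))))).map (fun q => q.1)

def pvS (row : List (Int × String)) (j : Int) : Int :=
  (PySem.List.min? (pvCandL row j) (fun y => y)).getD j

-- the `current` value A carries after having scanned prefix P of row i (cur0 = state on entry)
def pvCurOf (i : Int) (row : List (Int × String)) (cur0 : Option (Int × Int))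
    (P : List (Int × String)) : Option (Int × Int) :=
  match P.getLast? with
  | none => cur0
  | some p => if PySem.Str.strIsdigit p.2 then some (i, pvS row p.1) else none

-- region keys emitted for all rows in ks
def pvKeys (l : List ((Int × Int) × String)) (ks : List Int) : List (Int × Int) :=
  ks.flatMap (fun i => ((pvSrow l i).filter (fun q => PySem.Str.strIsdigit q.2)).map
    (fun q => (i, pvS (pvSrow l i) q.1)))

-- ---- generic option-extremum facts ----

lemma pv_max?_perm (xs ys : List Int) (h : xs.Perm ys) :
    PySem.List.max? xs (fun y => y) = PySem.List.max? ys (fun y => y) := by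
  cases hx : PySem.List.max? xs (fun y => y) with
  | none =>
    have : xs = [] := (PySem.List.max?_eq_none_iff xs _).mp hx
    subst this
    have : ys = [] := h.nil_eq.symm
    subst this
    exact ((PySem.List.max?_eq_none_iff _ _).mpr rfl).symm
  | some m =>
    cases hy : PySem.List.max? ys (fun y => y) with
    | none =>
      have : ys = [] := (PySem.List.max?_eq_none_iff ys _).mp hy
      subst this
      have := h.eq_nil
      subst this
      rw [(PySem.List.max?_eq_none_iff _ _).mpr rfl] at hx
      cases hx
    | some m' =>
      have h1 : m ≤ m' := PySem.List.max?_isMax hy m (h.mem_iff.mp (PySem.List.max?_mem hx))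
      have h2 : m' ≤ m := PySem.List.max?_isMax hx m' (h.mem_iff.mpr (PySem.List.max?_mem hy))
      simp [le_antisymm h1 h2]

lemma pv_min?_perm (xs ys : List Int) (h : xs.Perm ys) :
    PySem.List.min? xs (fun y => y) = PySem.List.min? ys (fun y => y) := by
  cases hx : PySem.List.min? xs (fun y => y) with
  | none =>
    have : xs = [] := (PySem.List.min?_eq_none_iff xs _).mp hx
    subst this
    have : ys = [] := h.nil_eq.symm
    subst this
    exact ((PySem.List.min?_eq_none_iff _ _).mpr rfl).symm
  | some m =>
    cases hy : PySem.List.min? ys (fun y => y) with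
    | none =>
      have : ys = [] := (PySem.List.min?_eq_none_iff ys _).mp hy
      subst this
      have := h.eq_nil
      subst this
      rw [(PySem.List.min?_eq_none_iff _ _).mpr rfl] at hx
      cases hx
    | some m' =>
      have h1 : m ≤ m' := PySem.List.min?_isMin hx m' (h.mem_iff.mpr (PySem.List.min?_mem hy))
      have h2 : m' ≤ m := PySem.List.min?_isMin hy m (h.mem_iff.mp (PySem.List.min?_mem hx))
      simp [le_antisymm h2 h1]

lemma pv_min?_eq (xs : List Int) (m : Int) (hm : m ∈ xs) (hlb : ∀ y ∈ xs, m ≤ y) :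
    PySem.List.min? xs (fun y => y) = some m := by
  cases hx : PySem.List.min? xs (fun y => y) with
  | none =>
    have : xs = [] := (PySem.List.min?_eq_none_iff xs _).mp hx
    subst this; cases hm
  | some m' =>
    have h1 : m' ≤ m := PySem.List.min?_isMin hx m hm
    have h2 : m ≤ m' := hlb m' (PySem.List.min?_mem hx)
    simp [le_antisymm h1 h2]

lemma pv_bar_lt (row : List (Int × String)) (j b : Int) (h : pvBar row j = some b) : b < j := by
  have := PySem.List.max?_mem h
  simp only [pvBarL, List.mem_map, List.mem_filter] at this
  obtain ⟨q, ⟨_, hq⟩, rfl⟩ := this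
  simp at hq
  exact hq.1

-- ---- facts about pvS along a sorted row (sorried first) ----

lemma pv_mem_cand (row : List (Int × String)) (j : Int) (q : Int × String)
    (hq : q ∈ row) (hd : PySem.Str.strIsdigit q.2 = true) (hle : q.1 ≤ j)
    (hbar : ∀ b, pvBar row j = some b → b < q.1) : q.1 ∈ pvCandL row j := by
  simp only [pvCandL, List.mem_map, List.mem_filter]
  refine ⟨q, ⟨hq, ?_⟩, rfl⟩
  cases hB : pvBar row j with
  | none => simp [hle]; simpa [PySem.Str.strIsdigit] using hd
  | some b =>
    simp [hle, hbar b hB]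
    simpa [PySem.Str.strIsdigit] using hd

lemma pv_cand_elim (row : List (Int × String)) (j y : Int) (hy : y ∈ pvCandL row j) :
    ∃ q ∈ row, q.1 = y ∧ PySem.Str.strIsdigit q.2 = true ∧ y ≤ j ∧
      (∀ b, pvBar row j = some b → b < y) := by
  simp only [pvCandL, List.mem_map, List.mem_filter] at hy
  obtain ⟨q, ⟨hq, hcond⟩, rfl⟩ := hy
  cases hB : pvBar row j with
  | none =>
    rw [hB] at hcond; simp at hcond
    refine ⟨q, hq, rfl, by simpa [PySem.Str.strIsdigit] using hcond.2, hcond.1,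
      fun b hb => absurd hb (by simp)⟩
  | some b =>
    rw [hB] at hcond; simp at hcond
    refine ⟨q, hq, rfl, by simpa [PySem.Str.strIsdigit] using hcond.2.1, hcond.1,
      fun b' hb' => (Option.some.inj hb') ▸ hcond.2.2⟩

lemma pv_min_cand (row : List (Int × String)) (j : Int)
    (hj : ∃ c, (j, c) ∈ row ∧ PySem.Str.strIsdigit c = true) :
    PySem.List.min? (pvCandL row j) (fun y => y) = some (pvS row j) := by
  obtain ⟨c, hc, hd⟩ := hj
  have hmem : j ∈ pvCandL row j :=
    pv_mem_cand row j (j, c) hc hd le_rfl (fun b hb => pv_bar_lt row j b hb)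
  cases hx : PySem.List.min? (pvCandL row j) (fun y => y) with
  | none =>
    have : pvCandL row j = [] := (PySem.List.min?_eq_none_iff _ _).mp hx
    rw [this] at hmem; cases hmem
  | some m => simp [pvS, hx]

lemma pv_s_le (row : List (Int × String)) (j : Int)
    (hj : ∃ c, (j, c) ∈ row ∧ PySem.Str.strIsdigit c = true) : pvS row j ≤ j := by
  obtain ⟨c, hc, hd⟩ := hj
  have hmem : j ∈ pvCandL row j :=
    pv_mem_cand row j (j, c) hc hd le_rfl (fun b hb => pv_bar_lt row j b hb)
  exact PySem.List.min?_isMin (pv_min_cand row j ⟨c, hc, hd⟩) j hmem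


lemma pv_split_lt (row P rest : List (Int × String)) (q : Int × String)
    (hs : (row.map (fun x => x.1)).Pairwise (· < ·)) (hsplit : row = P ++ q :: rest) :
    (∀ x ∈ P, x.1 < q.1) ∧ (∀ x ∈ rest, q.1 < x.1) := by
  subst hsplit
  rw [List.map_append, List.pairwise_append] at hs
  obtain ⟨h1, h2, h3⟩ := hs
  constructor
  · intro x hx
    exact h3 x.1 (List.mem_map_of_mem hx) q.1 (by simp)
  · intro x hx
    rw [List.map_cons, List.pairwise_cons] at h2
    exact h2.1 x.1 (List.mem_map_of_mem hx)

lemma pv_barl_elim (row : List (Int × String)) (j y : Int) (hy : y ∈ pvBarL row j) :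
    ∃ z ∈ row, z.1 = y ∧ PySem.Str.strIsdigit z.2 = false ∧ y < j := by
  simp only [pvBarL, List.mem_map, List.mem_filter] at hy
  obtain ⟨z, ⟨hz, hc⟩, rfl⟩ := hy
  simp at hc
  exact ⟨z, hz, rfl, by simpa [PySem.Str.strIsdigit] using hc.2, hc.1⟩

lemma pv_barl_intro (row : List (Int × String)) (j : Int) (z : Int × String)
    (hz : z ∈ row) (hnd : PySem.Str.strIsdigit z.2 = false) (hlt : z.1 < j) :
    z.1 ∈ pvBarL row j := by
  simp only [pvBarL, List.mem_map, List.mem_filter]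
  exact ⟨z, ⟨hz, by simp [hlt]; simpa [PySem.Str.strIsdigit] using hnd⟩, rfl⟩

lemma pv_bar_dominate (row : List (Int × String)) (j j' b : Int)
    (hb : b ∈ pvBarL row j) (hjj : j ≤ j') :
    ∃ b₂, pvBar row j' = some b₂ ∧ b ≤ b₂ := by
  obtain ⟨z, hz, hzb, hnd, hlt⟩ := pv_barl_elim row j b hb
  have hb' : b ∈ pvBarL row j' := hzb ▸ pv_barl_intro row j' z hz hnd (by omega)
  cases hB : pvBar row j' with
  | none =>
    have : pvBarL row j' = [] := (PySem.List.max?_eq_none_iff _ _).mp hB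
    rw [this] at hb'; cases hb'
  | some b₂ => exact ⟨b₂, rfl, PySem.List.max?_isMax hB b hb'⟩

-- a digit cell q that opens a new run (every earlier digit cell is cut off by a later
-- non-digit cell) is its own region start
lemma pv_s_new (row P rest : List (Int × String)) (q : Int × String)
    (hs : (row.map (fun x => x.1)).Pairwise (· < ·)) (hsplit : row = P ++ q :: rest)
    (hq : PySem.Str.strIsdigit q.2 = true)
    (hbreak : ∀ x ∈ P, PySem.Str.strIsdigit x.2 = true →
      ∃ p ∈ P, PySem.Str.strIsdigit p.2 = false ∧ x.1 < p.1 ∧ p.1 < q.1) :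
    pvS row q.1 = q.1 := by
  obtain ⟨hPlt, hRgt⟩ := pv_split_lt row P rest q hs hsplit
  have hqrow : q ∈ row := by rw [hsplit]; simp
  have hmin : PySem.List.min? (pvCandL row q.1) (fun y => y) = some q.1 := by
    apply pv_min?_eq
    · exact pv_mem_cand row q.1 q hqrow hq le_rfl (fun b hb => pv_bar_lt row q.1 b hb)
    · intro y hy
      obtain ⟨x, hx, hxy, hxd, hyle, hycond⟩ := pv_cand_elim row q.1 y hy
      by_contra hlt
      push Not at hlt
      -- y < q.1 : the generating cell x lies in P
      have hxP : x ∈ P := by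
        rw [hsplit] at hx
        rcases List.mem_append.mp hx with h | h
        · exact h
        · rcases List.mem_cons.mp h with rfl | h
          · omega
          · have := hRgt x h; omega
      obtain ⟨p, hpP, hpnd, hxp, hpq⟩ := hbreak x hxP hxd
      obtain ⟨b₂, hB, hle⟩ := pv_bar_dominate row q.1 q.1 p.1
        (pv_barl_intro row q.1 p (by rw [hsplit]; simp [List.mem_append.mpr (Or.inl hpP)]) hpnd hpq) le_rfl
      have := hycond b₂ hB
      omega
  simp [pvS, hmin]

-- a digit cell q directly continuing a run whose previous digit cell is p keeps p's start
lemma pv_s_cont (row P rest : List (Int × String)) (p q : Int × String)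
    (hs : (row.map (fun x => x.1)).Pairwise (· < ·)) (hsplit : row = (P ++ [p]) ++ q :: rest)
    (hp : PySem.Str.strIsdigit p.2 = true) (hq : PySem.Str.strIsdigit q.2 = true) :
    pvS row q.1 = pvS row p.1 := by
  obtain ⟨hPlt, hRgt⟩ := pv_split_lt row (P ++ [p]) rest q hs hsplit
  have hsplit' : row = P ++ p :: (q :: rest) := by rw [hsplit]; simp
  obtain ⟨hPlt', _⟩ := pv_split_lt row P (q :: rest) p hs hsplit'
  have hprow : p ∈ row := by rw [hsplit']; simp
  have hqrow : q ∈ row := by rw [hsplit']; simp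
  have hpq : p.1 < q.1 := hPlt p (by simp)
  have hminp : PySem.List.min? (pvCandL row p.1) (fun y => y) = some (pvS row p.1) :=
    pv_min_cand row p.1 ⟨p.2, by simpa using hprow, hp⟩
  set m := pvS row p.1 with hm
  have hmmem : m ∈ pvCandL row p.1 := PySem.List.min?_mem hminp
  obtain ⟨xm, hxm, hxmm, hxmd, hmle, hmcond⟩ := pv_cand_elim row p.1 m hmmem
  have hmin : PySem.List.min? (pvCandL row q.1) (fun y => y) = some m := by
    apply pv_min?_eq
    · -- m is a candidate at q.1
      refine hxmm ▸ pv_mem_cand row q.1 xm hxm hxmd (by omega) ?_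
      intro b hb
      -- b is the column of a non-digit cell left of q.1, hence left of p.1
      have hbmem : b ∈ pvBarL row q.1 := by
        cases hB : pvBar row q.1 with
        | none => rw [hB] at hb; cases hb
        | some b' =>
          obtain rfl := Option.some.inj (hB.symm.trans hb)
          exact PySem.List.max?_mem hB
      obtain ⟨z, hz, hzb, hznd, hblt⟩ := pv_barl_elim row q.1 b hbmem
      have hzP : z.1 < p.1 := by
        rw [hsplit'] at hz
        rcases List.mem_append.mp hz with h | h
        · exact hPlt' z h
        · rcases List.mem_cons.mp h with rfl | h
          · rw [hznd] at hp; cases hp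
          · rcases List.mem_cons.mp h with rfl | h
            · rw [hznd] at hq; cases hq
            · have := hRgt z h; omega
      obtain ⟨b₁, hB1, hle1⟩ := pv_bar_dominate row p.1 p.1 b
        (hzb ▸ pv_barl_intro row p.1 z hz hznd (by omega)) le_rfl
      have := hmcond b₁ hB1
      omega
    · intro y hy
      obtain ⟨x, hx, hxy, hxd, hyle, hycond⟩ := pv_cand_elim row q.1 y hy
      by_cases hyp : y ≤ p.1
      · -- y is also a candidate at p.1
        have : y ∈ pvCandL row p.1 := by
          refine hxy ▸ pv_mem_cand row p.1 x hx hxd (hxy ▸ hyp) ?_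
          intro b₁ hB1
          have hb1mem : b₁ ∈ pvBarL row p.1 := by
            cases hB : pvBar row p.1 with
            | none => rw [hB] at hB1; cases hB1
            | some b' =>
              obtain rfl := Option.some.inj (hB.symm.trans hB1)
              exact PySem.List.max?_mem hB
          obtain ⟨b₂, hB2, hle2⟩ := pv_bar_dominate row p.1 q.1 b₁ hb1mem (by omega)
          have := hycond b₂ hB2
          omega
        have := PySem.List.min?_isMin hminp y this
        omega
      · -- p.1 < y ≤ q.1 forces y = q.1
        have hyq : y = q.1 := by
          rw [hsplit'] at hx
          rcases List.mem_append.mp hx with h | h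
          · have := hPlt' x h; omega
          · rcases List.mem_cons.mp h with rfl | h
            · omega
            · rcases List.mem_cons.mp h with rfl | h
              · omega
              · have := hRgt x h; omega
        omega
  simp [pvS, hmin]

-- region starts are monotone along a row
lemma pv_s_mono (row : List (Int × String)) (x y : Int × String)
    (hx : x ∈ row) (hy : y ∈ row)
    (hxd : PySem.Str.strIsdigit x.2 = true) (hyd : PySem.Str.strIsdigit y.2 = true)
    (hlt : x.1 < y.1) : pvS row x.1 ≤ pvS row y.1 := by
  have hminx : PySem.List.min? (pvCandL row x.1) (fun z => z) = some (pvS row x.1) :=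
    pv_min_cand row x.1 ⟨x.2, by simpa using hx, hxd⟩
  have hminy : PySem.List.min? (pvCandL row y.1) (fun z => z) = some (pvS row y.1) :=
    pv_min_cand row y.1 ⟨y.2, by simpa using hy, hyd⟩
  set m := pvS row y.1 with hm
  have hmmem : m ∈ pvCandL row y.1 := PySem.List.min?_mem hminy
  obtain ⟨xm, hxmr, hxmm, hxmd, hmle, hmcond⟩ := pv_cand_elim row y.1 m hmmem
  by_cases hcase : m ≤ x.1
  · have : m ∈ pvCandL row x.1 := by
      refine hxmm ▸ pv_mem_cand row x.1 xm hxmr hxmd (hxmm ▸ hcase) ?_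
      intro b hb
      have hbmem : b ∈ pvBarL row x.1 := by
        cases hB : pvBar row x.1 with
        | none => rw [hB] at hb; cases hb
        | some b' =>
          obtain rfl := Option.some.inj (hB.symm.trans hb)
          exact PySem.List.max?_mem hB
      obtain ⟨b₂, hB2, hle2⟩ := pv_bar_dominate row x.1 y.1 b hbmem (by omega)
      have := hmcond b₂ hB2
      omega
    have := PySem.List.min?_isMin hminx m this
    omega
  · have := pv_s_le row x.1 ⟨x.2, by simpa using hx, hxd⟩
    omega


-- ---- lemmas about the sorted decomposition (row blocks of the globally sorted items) ----

lemma pv_perm_flatMap_filter {α : Type} (f : α → Int) :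
    ∀ (ks : List Int) (l : List α), ks.Nodup → (∀ x ∈ l, f x ∈ ks) →
    (ks.flatMap (fun k => l.filter (fun x => f x == k))).Perm l := by
  intro ks
  induction ks with
  | nil =>
    intro l _ h
    have : l = [] := by
      cases l with
      | nil => rfl
      | cons a t => exact absurd (h a (by simp)) (by simp)
    simp [this]
  | cons k ks ih =>
    intro l hnd h
    have hk : k ∉ ks := (List.nodup_cons.mp hnd).1
    have hcong : ks.flatMap (fun i => l.filter (fun x => f x == i))
        = ks.flatMap (fun i => (l.filter (fun x => !(f x == k))).filter (fun x => f x == i)) := by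
      apply List.flatMap_congr
      intro i hi
      rw [List.filter_filter]
      apply List.filter_congr
      intro x _
      by_cases hx : f x = i
      · have hfk : ¬ f x = k := by rintro rfl; exact hk (hx ▸ hi)
        simp [hx]
        rintro rfl; exact hfk hx
      · simp [hx]
    have hmem : ∀ x ∈ l.filter (fun x => !(f x == k)), f x ∈ ks := by
      intro x hx
      rw [List.mem_filter] at hx
      have := h x hx.1
      simp at this ⊢
      rcases this with h' | h'
      · exact absurd h' (by simpa using hx.2)
      · exact h'
    have hperm := ih (l.filter (fun x => !(f x == k))) (List.nodup_cons.mp hnd).2 hmem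
    have step1 : (k :: ks).flatMap (fun i => l.filter (fun x => f x == i))
        = l.filter (fun x => f x == k) ++ ks.flatMap (fun i => l.filter (fun x => f x == i)) := by
      simp [List.flatMap_cons]
    rw [step1]
    exact ((List.Perm.append_left _ (hcong ▸ hperm)).trans (List.filter_append_perm _ l))

lemma pv_sorted2_eq_lex (l : List ((Int × Int) × String)) :
    PySem.List.sorted2 l (fun e => e.1.1) (fun e => e.1.2)
      = PySem.List.sorted l (fun e => (toLex (e.1.1, e.1.2) : Lex (Int × Int))) := by
  have hb : (fun (a b : (Int × Int) × String) =>
        decide (a.1.1 < b.1.1) || (!decide (b.1.1 < a.1.1) && decide (a.1.2 < b.1.2)))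
      = (fun (a b : (Int × Int) × String) =>
        decide ((toLex (a.1.1, a.1.2) : Lex (Int × Int)) < toLex (b.1.1, b.1.2))) := by
    funext a b
    rcases lt_trichotomy a.1.1 b.1.1 with h | h | h
    · simp [Prod.Lex.lt_iff, h]
    · simp [Prod.Lex.lt_iff, h]
    · have h1 : ¬ a.1.1 < b.1.1 := by omega
      have h2 : a.1.1 ≠ b.1.1 := by omega
      simp [Prod.Lex.lt_iff, h, h1, h2]
  unfold PySem.List.sorted2 PySem.List.sorted
  dsimp only
  rw [hb]
  simp

lemma pv_sorted2_pair (l : List (Int × Int)) :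
    PySem.List.sorted2 l (fun k => k.1) (fun k => k.2)
      = PySem.List.sorted l (fun k => (toLex k : Lex (Int × Int))) := by
  have hb : (fun (a b : Int × Int) =>
        decide (a.1 < b.1) || (!decide (b.1 < a.1) && decide (a.2 < b.2)))
      = (fun (a b : Int × Int) =>
        decide ((toLex a : Lex (Int × Int)) < toLex b)) := by
    funext a b
    rcases lt_trichotomy a.1 b.1 with h | h | h
    · simp [Prod.Lex.lt_iff, h]
    · simp [Prod.Lex.lt_iff, h]
    · have h1 : ¬ a.1 < b.1 := by omega
      have h2 : a.1 ≠ b.1 := by omega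
      simp [Prod.Lex.lt_iff, h, h1, h2]
  unfold PySem.List.sorted2 PySem.List.sorted
  dsimp only
  rw [hb]
  simp

lemma pv_srow_fst_lt (l : List ((Int × Int) × String)) (hnd : (l.map (·.1)).Nodup) (i : Int) :
    ((pvSrow l i).map (·.1)).Pairwise (· < ·) := by
  have hle : ((pvSrow l i).map (·.1)).Pairwise (· ≤ ·) := PySem.List.sorted_map_key_pairwise _ _
  have hlnd : l.Nodup := hnd.of_map
  have hfnd : (l.filter (fun e => e.1.1 == i)).Nodup := (List.filter_sublist).nodup hlnd
  have hK : ((l.filter (fun e => e.1.1 == i)).map (·.1)).Nodup :=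
    hnd.sublist ((List.filter_sublist).map _)
  have hinj := List.inj_on_of_nodup_map hK
  have hMnd : (((l.filter (fun e => e.1.1 == i)).map (fun e => (e.1.2, e.2))).map (·.1)).Nodup := by
    rw [List.map_map]
    apply List.Nodup.map_on ?_ hfnd
    intro x hx y hy hxy
    simp only [Function.comp] at hxy
    have hxi : x.1.1 = i := by simpa using (List.mem_filter.mp hx).2
    have hyi : y.1.1 = i := by simpa using (List.mem_filter.mp hy).2
    exact hinj hx hy (Prod.ext (hxi.trans hyi.symm) hxy)
  have hperm : ((pvSrow l i).map (·.1)).Perm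
      (((l.filter (fun e => e.1.1 == i)).map (fun e => (e.1.2, e.2))).map (·.1)) :=
    (PySem.List.sorted_perm _ _ _).map _
  have hnd2 : ((pvSrow l i).map (·.1)).Nodup := hperm.nodup_iff.mpr hMnd
  exact (hle.and hnd2).imp (fun ⟨a, b⟩ => lt_of_le_of_ne a b)

lemma pv_block_eq_filter (l : List ((Int × Int) × String)) (i : Int) :
    ((l.filter (fun e => e.1.1 == i)).map (fun e => (e.1.2, e.2))).map (pvLift i)
      = l.filter (fun e => e.1.1 == i) := by
  rw [List.map_map]
  have : ∀ e ∈ l.filter (fun e => e.1.1 == i), (pvLift i ∘ fun e => (e.1.2, e.2)) e = id e := by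
    intro e he
    have hei : e.1.1 = i := by simpa using (List.mem_filter.mp he).2
    simp [pvLift, Function.comp, ← hei]
  rw [List.map_congr_left this, List.map_id]

lemma pv_ks_nodup (l : List ((Int × Int) × String)) : (pvKs l).Nodup :=
  ((PySem.List.sorted_perm _ _ _).nodup_iff).mpr (PySem.Set.nodup_ofList _)

lemma pv_mem_ks (l : List ((Int × Int) × String)) (x : (Int × Int) × String) (hx : x ∈ l) :
    x.1.1 ∈ pvKs l := by
  rw [pvKs, PySem.List.mem_sorted, PySem.Set.mem_ofList]
  exact List.mem_map.mpr ⟨x, hx, rfl⟩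

lemma pv_sorted_decomp (l : List ((Int × Int) × String)) (hnd : (l.map (·.1)).Nodup) :
    PySem.List.sorted l (fun e => (toLex (e.1.1, e.1.2) : Lex (Int × Int)))
      = (pvKs l).flatMap (fun i => (pvSrow l i).map (pvLift i)) := by
  apply PySem.List.sorted_eq_of_perm_of_pairwise_lt
  · have hblock : ∀ i ∈ pvKs l, ((pvSrow l i).map (pvLift i)).Perm (l.filter (fun e => e.1.1 == i)) := by
      intro i _
      have := ((PySem.List.sorted_perm ((l.filter (fun e => e.1.1 == i)).map (fun e => (e.1.2, e.2))) (fun q => q.1) false).map (pvLift i))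
      rw [pv_block_eq_filter] at this
      exact this
    exact (List.Perm.flatMap (List.Perm.refl (pvKs l)) hblock).trans
      (pv_perm_flatMap_filter (fun e => e.1.1) (pvKs l) l (pv_ks_nodup l) (fun x hx => pv_mem_ks l x hx))
  · have hks : (pvKs l).Pairwise (· < ·) := PySem.List.sorted_ofList_pairwise_lt _
    generalize pvKs l = ks at hks ⊢
    induction ks with
    | nil => simp
    | cons i ks ih =>
      rw [List.flatMap_cons, List.pairwise_append]
      obtain ⟨hhead, htail⟩ := List.pairwise_cons.mp hks
      refine ⟨?_, ih htail, ?_⟩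
      · rw [List.pairwise_map]
        have hjs := pv_srow_fst_lt l hnd i
        rw [List.pairwise_map] at hjs
        refine hjs.imp ?_
        intro a b hab
        simp only [pvLift]
        simp [Prod.Lex.lt_iff, hab]
      · intro a ha b hb
        obtain ⟨qa, _, rfl⟩ := List.mem_map.mp ha
        rw [List.mem_flatMap] at hb
        obtain ⟨i', hi', hb⟩ := hb
        obtain ⟨qb, _, rfl⟩ := List.mem_map.mp hb
        simp only [pvLift]
        simp [Prod.Lex.lt_iff, hhead i' hi']

-- ---- A's scan over one sorted row ----

lemma pv_row_scan (i : Int) (row : List (Int × String))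
    (hs : (row.map (fun x => x.1)).Pairwise (· < ·))
    (cur0 : Option (Int × Int)) (h0 : ∀ p, cur0 = some p → p.1 ≠ i) :
    ∀ (rest P : List (Int × String)), row = P ++ rest → ∀ regs,
    (rest.map (pvLift i)).foldl pvAStep (regs, pvCurOf i row cur0 P)
      = (((rest.filter (fun q => PySem.Str.strIsdigit q.2)).map
            (fun q => ((i : Int), pvS row q.1))).foldl (fun d k => d.modify k 0 (· + 1)) regs,
         pvCurOf i row cur0 (P ++ rest)) := by
  intro rest
  induction rest with
  | nil => intro P h regs; simp
  | cons q rest' ih =>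
    intro P hsplit regs
    have hsplit' : row = (P ++ [q]) ++ rest' := by rw [hsplit]; simp
    by_cases hd : PySem.Str.strIsdigit q.2 = true
    · have hd' : PySem.Chars.strIsdigit q.2.toList = true := by
        simpa [PySem.Str.strIsdigit] using hd
      have hkey : pvAStep (regs, pvCurOf i row cur0 P) (pvLift i q)
          = (regs.modify (i, pvS row q.1) 0 (· + 1), some (i, pvS row q.1)) := by
        cases hL : P.getLast? with
        | none =>
          have hPnil : P = [] := List.getLast?_eq_none_iff.mp hL
          have hSq : pvS row q.1 = q.1 := by
            apply pv_s_new row P rest' q hs hsplit hd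
            intro x hx _
            rw [hPnil] at hx; cases hx
          rw [hSq]
          cases hc : cur0 with
          | none => simp [pvAStep, pvLift, pvCurOf, hL, hd']
          | some c0 =>
            have : c0.1 ≠ i := h0 c0 hc
            simp [pvAStep, pvLift, pvCurOf, hL, hd', Ne.symm this]
        | some p =>
          obtain ⟨P₀, rfl⟩ := List.getLast?_eq_some_iff.mp hL
          by_cases hpd : PySem.Str.strIsdigit p.2 = true
          · have hpd' : PySem.Chars.strIsdigit p.2.toList = true := by
              simpa [PySem.Str.strIsdigit] using hpd
            have hSq : pvS row q.1 = pvS row p.1 := pv_s_cont row P₀ rest' p q hs hsplit hpd hd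
            simp [pvAStep, pvLift, pvCurOf, hL, hpd', hd', hSq]
          · have hpd' : PySem.Chars.strIsdigit p.2.toList = false := by
              revert hpd; simp [PySem.Str.strIsdigit]
            have hSq : pvS row q.1 = q.1 := by
              apply pv_s_new row (P₀ ++ [p]) rest' q hs hsplit hd
              intro x hx hxd
              have hxP : x ∈ P₀ := by
                rcases List.mem_append.mp hx with h | h
                · exact h
                · rcases List.mem_cons.mp h with rfl | h
                  · rw [hxd] at hpd; exact absurd rfl hpd
                  · cases h
              obtain ⟨h1, _⟩ := pv_split_lt row P₀ (q :: rest') p hs (by rw [hsplit]; simp)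
              obtain ⟨h2, _⟩ := pv_split_lt row (P₀ ++ [p]) rest' q hs hsplit
              exact ⟨p, by simp, by simp [PySem.Str.strIsdigit, hpd'], h1 x hxP, h2 p (by simp)⟩
            rw [hSq]
            simp [pvAStep, pvLift, pvCurOf, hL, hpd', hd']
      rw [List.map_cons, List.foldl_cons, hkey]
      have hcur : some ((i : Int), pvS row q.1) = pvCurOf i row cur0 (P ++ [q]) := by
        simp [pvCurOf, hd']
      rw [hcur, ih (P ++ [q]) hsplit' _]
      simp [hd']
    · have hd' : PySem.Chars.strIsdigit q.2.toList = false := by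
        revert hd; simp [PySem.Str.strIsdigit]
      have hstep : pvAStep (regs, pvCurOf i row cur0 P) (pvLift i q) = (regs, none) := by
        simp [pvAStep, pvLift, hd']
      have hcur : (none : Option (Int × Int)) = pvCurOf i row cur0 (P ++ [q]) := by
        simp [pvCurOf, hd']
      rw [List.map_cons, List.foldl_cons, hstep, hcur, ih (P ++ [q]) hsplit' regs]
      simp [hd']

-- ---- A's scan over all rows ----

lemma pv_outer (l : List ((Int × Int) × String)) (hnd : (l.map (·.1)).Nodup) :
    ∀ ks : List Int, ks.Nodup →
    ∀ (regs : PySem.Dict (Int × Int) Int) (cur0 : Option (Int × Int)),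
      (∀ p, cur0 = some p → p.1 ∉ ks) →
      ((ks.flatMap (fun i => (pvSrow l i).map (pvLift i))).foldl pvAStep (regs, cur0)).1
        = (pvKeys l ks).foldl (fun d k => d.modify k 0 (· + 1)) regs := by
  intro ks
  induction ks with
  | nil => intro _ regs cur0 _; simp [pvKeys]
  | cons i ks ih =>
    intro hknd regs cur0 h0
    rw [List.flatMap_cons, List.foldl_append]
    have hs := pv_srow_fst_lt l hnd i
    have h0i : ∀ p, cur0 = some p → p.1 ≠ i := by
      intro p hp
      have := h0 p hp
      simp at this
      exact this.1
    have hrow := pv_row_scan i (pvSrow l i) hs cur0 h0i (pvSrow l i) [] (by simp) regs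
    have hcur0 : pvCurOf i (pvSrow l i) cur0 [] = cur0 := rfl
    rw [hcur0] at hrow
    rw [show ([] : List (Int × String)) ++ pvSrow l i = pvSrow l i from by simp] at hrow
    rw [hrow]
    have hnext : ∀ p, pvCurOf i (pvSrow l i) cur0 (pvSrow l i) = some p → p.1 ∉ ks := by
      intro p hp
      unfold pvCurOf at hp
      cases hL : (pvSrow l i).getLast? with
      | none =>
        rw [hL] at hp
        have := h0 p hp
        simp at this
        exact this.2
      | some pl =>
        rw [hL] at hp
        dsimp only at hp
        by_cases hpd : PySem.Str.strIsdigit pl.2 = true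
        · rw [if_pos hpd] at hp
          obtain rfl := Option.some.inj hp.symm
          exact (List.nodup_cons.mp hknd).1
        · rw [if_neg hpd] at hp; cases hp
    rw [ih (List.nodup_cons.mp hknd).2 _ _ hnext]
    simp only [pvKeys, List.flatMap_cons, List.foldl_append]


-- ---- bridging B's closed forms (read over the whole item list) to the per-row forms ----

lemma pv_filter_bridge (l : List ((Int × Int) × String)) (i : Int) (P : Int → String → Bool) :
    ((l.filter (fun x => x.1.1 == i && P x.1.2 x.2)).map (fun x => x.1.2)).Perm
      (((pvSrow l i).filter (fun q => P q.1 q.2)).map (fun q => q.1)) := by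
  have h1 : ((pvSrow l i).filter (fun q => P q.1 q.2)).Perm
      (((l.filter (fun e => e.1.1 == i)).map (fun e => (e.1.2, e.2))).filter
        (fun q => P q.1 q.2)) :=
    (PySem.List.sorted_perm _ _ _).filter _
  have h2 := (h1.map (fun q => q.1)).symm
  rw [List.filter_map, List.map_map] at h2
  have h3 : (l.filter (fun e => e.1.1 == i)).filter
        ((fun q => P q.1 q.2) ∘ (fun e => (e.1.2, e.2)))
      = l.filter (fun x => x.1.1 == i && P x.1.2 x.2) := by
    rw [List.filter_filter]
    apply List.filter_congr
    intro x _
    exact Bool.and_comm _ _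
  rw [h3] at h2
  rw [show ((fun (q : Int × String) => q.1) ∘ (fun (e : (Int × Int) × String) => (e.1.2, e.2)))
      = (fun (x : (Int × Int) × String) => x.1.2) from rfl] at h2
  exact h2

lemma pv_mem_srow (l : List ((Int × Int) × String)) (e : (Int × Int) × String) (he : e ∈ l) :
    (e.1.2, e.2) ∈ pvSrow l e.1.1 := by
  rw [pvSrow, PySem.List.mem_sorted]
  exact List.mem_map.mpr ⟨e, List.mem_filter.mpr ⟨he, by simp⟩, rfl⟩

lemma pv_startB_eq (l : List ((Int × Int) × String)) (e : (Int × Int) × String)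
    (he : e ∈ l) (hd : PySem.Str.strIsdigit e.2 = true) :
    pvStartB l e.1.1 e.1.2 = some (pvS (pvSrow l e.1.1) e.1.2) := by
  have hbar : PySem.List.max? ((l.filter (fun x => x.1.1 == e.1.1 &&
        (decide (x.1.2 < e.1.2) && !PySem.Str.strIsdigit x.2))).map (fun x => x.1.2)) (fun y => y)
      = pvBar (pvSrow l e.1.1) e.1.2 :=
    pv_max?_perm _ _ (pv_filter_bridge l e.1.1
      (fun jj cc => decide (jj < e.1.2) && !PySem.Str.strIsdigit cc))
  rw [pvStartB]
  rw [hbar]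
  have hcand := pv_min?_perm _ _ (pv_filter_bridge l e.1.1
    (fun jj cc => decide (jj ≤ e.1.2) && (PySem.Str.strIsdigit cc &&
      (match pvBar (pvSrow l e.1.1) e.1.2 with | none => true | some b => decide (b < jj)))))
  rw [hcand]
  exact pv_min_cand (pvSrow l e.1.1) e.1.2 ⟨e.2, pv_mem_srow l e he, hd⟩

-- the region keys of all digit cells, read off the unsorted item list (B's `starts`)
def pvKB (l : List ((Int × Int) × String)) : List (Int × Int) :=
  (l.filter (fun e => PySem.Str.strIsdigit e.2)).map
    (fun e => (e.1.1, pvS (pvSrow l e.1.1) e.1.2))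

lemma pv_keys_perm (l : List ((Int × Int) × String)) :
    (pvKeys l (pvKs l)).Perm (pvKB l) := by
  have base := pv_perm_flatMap_filter (fun e => e.1.1) (pvKs l)
    (l.filter (fun e => PySem.Str.strIsdigit e.2)) (pv_ks_nodup l)
    (fun x hx => pv_mem_ks l x (List.mem_filter.mp hx).1)
  have hmap := base.map (fun e => ((e.1.1 : Int), pvS (pvSrow l e.1.1) e.1.2))
  rw [List.map_flatMap] at hmap
  refine List.Perm.trans ?_ hmap
  apply List.Perm.flatMap (List.Perm.refl (pvKs l))
  intro i _
  -- one block: the sorted row's digit cells vs the unsorted ones of row i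
  have hout : ((l.filter (fun e => PySem.Str.strIsdigit e.2)).filter (fun x => x.1.1 == i))
      = (l.filter (fun e => e.1.1 == i)).filter (fun e => PySem.Str.strIsdigit e.2) := by
    rw [List.filter_filter, List.filter_filter]
    apply List.filter_congr
    intro x _
    exact Bool.and_comm _ _
  rw [hout]
  have h1 : ((pvSrow l i).filter (fun q => PySem.Str.strIsdigit q.2)).Perm
      (((l.filter (fun e => e.1.1 == i)).map (fun e => (e.1.2, e.2))).filter
        (fun q => PySem.Str.strIsdigit q.2)) :=
    (PySem.List.sorted_perm _ _ _).filter _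
  have h2 := h1.map (fun q => ((i : Int), pvS (pvSrow l i) q.1))
  rw [List.filter_map, List.map_map] at h2
  refine h2.trans ?_
  rw [show ((fun q => PySem.Str.strIsdigit q.2) ∘ (fun (e : (Int × Int) × String) => (e.1.2, e.2)))
      = (fun e => PySem.Str.strIsdigit e.2) from rfl]
  apply List.Perm.of_eq
  apply List.map_congr_left
  intro x hx
  have hxi : x.1.1 = i := by
    simpa using (List.mem_filter.mp (List.mem_filter.mp hx).1).2
  simp [Function.comp, hxi]


-- ---- order facts for the final dictionaries ----

lemma pv_keys_pairwise (l : List ((Int × Int) × String)) (hnd : (l.map (·.1)).Nodup) :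
    (pvKeys l (pvKs l)).Pairwise (fun a b => (toLex a : Lex (Int × Int)) ≤ toLex b) := by
  rw [pvKeys]
  have hks : (pvKs l).Pairwise (· < ·) := PySem.List.sorted_ofList_pairwise_lt _
  generalize pvKs l = ks at hks ⊢
  induction ks with
  | nil => simp
  | cons i ks ih =>
    rw [List.flatMap_cons, List.pairwise_append]
    obtain ⟨hhead, htail⟩ := List.pairwise_cons.mp hks
    refine ⟨?_, ih htail, ?_⟩
    · rw [List.pairwise_map]
      have hcols : (((pvSrow l i).filter (fun q => PySem.Str.strIsdigit q.2)).map (·.1)).Pairwise (· < ·) :=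
        List.Pairwise.sublist ((List.filter_sublist).map _) (pv_srow_fst_lt l hnd i)
      rw [List.pairwise_map] at hcols
      refine List.Pairwise.imp_of_mem ?_ hcols
      intro a b ha hb hab
      have ha' := List.mem_filter.mp ha
      have hb' := List.mem_filter.mp hb
      have := pv_s_mono (pvSrow l i) a b ha'.1 hb'.1 ha'.2 hb'.2 hab
      simp [Prod.Lex.le_iff, this]
    · intro a ha b hb
      obtain ⟨qa, _, rfl⟩ := List.mem_map.mp ha
      rw [List.mem_flatMap] at hb
      obtain ⟨i', hi', hb⟩ := hb
      obtain ⟨qb, _, rfl⟩ := List.mem_map.mp hb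
      have : i < i' := hhead i' hi'
      simp [Prod.Lex.le_iff, this]

lemma pv_foldl_add_sublist {α : Type} [BEq α] :
    ∀ (xs s : List α), (xs.foldl PySem.Set.add s).Sublist (s ++ xs) := by
  intro xs
  induction xs with
  | nil => intro s; simp
  | cons x xs ih =>
    intro s
    rw [List.foldl_cons]
    refine (ih (PySem.Set.add s x)).trans ?_
    unfold PySem.Set.add
    by_cases h : PySem.Set.contains s x = true
    · rw [if_pos h]
      exact List.append_sublist_append_left s |>.mpr (List.sublist_cons_self x xs)
    · rw [if_neg h]
      have : (s ++ [x]) ++ xs = s ++ x :: xs := by simp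
      rw [this]

lemma pv_ofList_sublist {α : Type} [BEq α] (xs : List α) :
    (PySem.Set.ofList xs).Sublist xs := by
  have h := pv_foldl_add_sublist xs ([] : List α)
  rw [PySem.Set.ofList_eq_foldl]
  exact h

lemma pv_set_pairwise_lt (l : List ((Int × Int) × String)) (hnd : (l.map (·.1)).Nodup) :
    (PySem.Set.ofList (pvKeys l (pvKs l))).Pairwise
      (fun a b => (toLex a : Lex (Int × Int)) < toLex b) := by
  have hle : (PySem.Set.ofList (pvKeys l (pvKs l))).Pairwise
      (fun a b => (toLex a : Lex (Int × Int)) ≤ toLex b) :=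
    List.Pairwise.sublist (pv_ofList_sublist _) (pv_keys_pairwise l hnd)
  have hnd2 : (PySem.Set.ofList (pvKeys l (pvKs l))).Nodup := PySem.Set.nodup_ofList _
  exact (hle.and hnd2).imp
    (fun ⟨hab, hne⟩ => lt_of_le_of_ne hab (fun h => hne (toLex.injective h)))

-- ===== VERDICT (by name: the statement is the Claim_ definition above) =====
theorem find_number_regions_spec : Claim_equal_find_number_regions := by
  intro board _
  unfold Spec_find_number_regions find_number_regions find_number_regions_alt
  dsimp only
  set l := (PySem.Dict.ofList (board.map (fun p => ((p.1, p.2.1), p.2.2)))).items with hl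
  have hnd : (l.map (·.1)).Nodup := PySem.Dict.nodup_keys_ofList _
  rw [pv_sorted2_eq_lex, pv_sorted_decomp l hnd,
      pv_outer l hnd (pvKs l) (pv_ks_nodup l) PySem.Dict.empty none (fun p hp => by cases hp)]
  -- A's dictionary is a counter over the region keys KF of the sorted scan
  set KF := pvKeys l (pvKs l) with hKF
  set DA := KF.foldl (fun d k => d.modify k (0 : Int) (· + 1))
    (PySem.Dict.empty : PySem.Dict (Int × Int) Int) with hDA
  have hkeysA : DA.keys = PySem.Set.ofList KF := by
    rw [hDA, PySem.Dict.keys_foldl_modify KF (0 : Int) (fun _ _ => (· + 1)) PySem.Dict.empty]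
    exact PySem.Set.update_empty KF
  have hndA : DA.keys.Nodup := by rw [hkeysA]; exact PySem.Set.nodup_ofList _
  have hitemsA : DA.items = (PySem.Set.ofList KF).map (fun k => (k, (KF.count k : Int))) := by
    rw [PySem.Dict.items_eq_map_keys DA hndA 0, hkeysA]
    apply List.map_congr_left
    intro k _
    rw [hDA, PySem.Dict.getD_foldl_modify_add_one KF PySem.Dict.empty k]
    simp
  -- B's start list is exactly the region keys, read off the unsorted items
  have hstarts : (l.filter (fun e => PySem.Str.strIsdigit e.2)).map
        (fun e => (e.1.1, (pvStartB l e.1.1 e.1.2).getD e.1.2)) = pvKB l := by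
    rw [pvKB]
    apply List.map_congr_left
    intro e he
    have h1 := List.mem_filter.mp he
    rw [pv_startB_eq l e h1.1 h1.2]
    rfl
  rw [hstarts]
  have hperm : KF.Perm (pvKB l) := pv_keys_perm l
  have hsort : PySem.List.sorted2 (PySem.Set.ofList (pvKB l)) (fun k => k.1) (fun k => k.2)
      = PySem.Set.ofList KF := by
    rw [pv_sorted2_pair]
    apply PySem.List.sorted_eq_of_perm_of_pairwise_lt
    · refine (List.perm_ext_iff_of_nodup (PySem.Set.nodup_ofList _) (PySem.Set.nodup_ofList _)).mpr ?_
      intro a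
      rw [PySem.Set.mem_ofList, PySem.Set.mem_ofList]
      exact hperm.mem_iff
    · exact pv_set_pairwise_lt l hnd
  rw [hsort]
  -- B's dictionary: fresh inserts of the sorted distinct keys
  rw [PySem.Dict.items_foldl_insert_fresh (PySem.Set.ofList KF) (fun a => a)
      (fun a => ((pvKB l).count a : Int)) PySem.Dict.empty
      (by intro a _; rfl) (by simp)]
  rw [hitemsA]
  have hempty : (PySem.Dict.empty : PySem.Dict (Int × Int) Int).items = [] := rfl
  rw [hempty, List.nil_append, List.map_map, List.map_map]
  apply List.map_congr_left
  intro k _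
  simp [Function.comp, hperm.count_eq]
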